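-- pv_equiv track=rewrite | github.com/Fatur-Maulidan/Disk-Scheduling | main.py | sortTrackForCSCAN
-- ===== SOURCE A (Python) =====
-- def sortTrackForCSCAN(track, head):
--     track_temp = []
--
--     for i in range(len(track)):
--         if(head < track[i]):
--             track_temp.append(track[i])
--
--     for i in range(len(track)):
--         if(head > track[i]):
--             track_temp.append(track[i])
--
--     return track_temp
-- ===== SOURCE B (Python) =====
-- def sortTrackForCSCAN(track, head):
--     greater = []
--     lesser = []
--     for x in track:
--         if x > head:
--             greater.append(x)
--         elif x < head:
--             lesser.append(x)
--     return greater + lesser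
-- ===== Notes on version B (the rewrite author's own statement) =====
-- stated objective: alternative
-- what changed: Replaces A's two sequential index-based filtering passes over track with a single traversal that partitions elements into two maintained accumulators (greater/lesser) and concatenates them.
import Mathlib
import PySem

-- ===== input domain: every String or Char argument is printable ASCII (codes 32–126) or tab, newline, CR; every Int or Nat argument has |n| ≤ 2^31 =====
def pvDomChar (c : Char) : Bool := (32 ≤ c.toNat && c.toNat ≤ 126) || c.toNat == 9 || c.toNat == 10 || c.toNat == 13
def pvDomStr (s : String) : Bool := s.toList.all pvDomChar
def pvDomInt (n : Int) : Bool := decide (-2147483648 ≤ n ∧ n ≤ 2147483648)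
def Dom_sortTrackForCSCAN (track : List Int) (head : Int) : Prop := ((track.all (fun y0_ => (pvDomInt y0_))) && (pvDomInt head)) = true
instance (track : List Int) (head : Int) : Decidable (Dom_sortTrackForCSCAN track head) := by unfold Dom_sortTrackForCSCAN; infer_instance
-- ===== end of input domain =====

-- B replaces A's two sequential filtering passes with a single traversal keeping two
-- accumulators (greater / lesser) and concatenating them; same cost, different decomposition.

-- ===== PORT A =====
-- A iterates over indices 0..len(track)-1 twice, appending track[i] when the comparison
-- holds; each for-loop is the corresponding left fold over the list's elements in order.
def sortTrackForCSCAN (track : List Int) (head : Int) : List Int :=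
  let track_temp := track.foldl (fun acc x => if head < x then acc ++ [x] else acc) []
  let track_temp := track.foldl (fun acc x => if head > x then acc ++ [x] else acc) track_temp
  track_temp

-- ===== PORT B =====
-- single pass maintaining the two buckets
def pvAltLoop (head : Int) : List Int → List Int → List Int → List Int × List Int
  | [], g, l => (g, l)
  | x :: xs, g, l =>
      if x > head then pvAltLoop head xs (g ++ [x]) l
      else if x < head then pvAltLoop head xs g (l ++ [x])
      else pvAltLoop head xs g l

def sortTrackForCSCAN_alt (track : List Int) (head : Int) : List Int :=
  let p := pvAltLoop head track [] []
  p.1 ++ p.2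

-- ===== PRECONDITION & SPEC =====
def Spec_sortTrackForCSCAN (track : List Int) (head : Int) (out : List Int) : Prop := out = sortTrackForCSCAN_alt track head
instance (track : List Int) (head : Int) (out : List Int) : Decidable (Spec_sortTrackForCSCAN track head out) := by unfold Spec_sortTrackForCSCAN; infer_instance

-- ===== CLAIM (what is proved, stated in full; the proofs are below) =====
def Claim_equal_sortTrackForCSCAN : Prop := ∀ (track : List Int) (head : Int), Dom_sortTrackForCSCAN track head → Spec_sortTrackForCSCAN track head (sortTrackForCSCAN track head)

-- ===== LEMMAS AND PROOFS =====

theorem pv_foldl_filter (p : Int → Prop) [DecidablePred p] (track g : List Int) :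
    track.foldl (fun acc x => if p x then acc ++ [x] else acc) g
      = g ++ track.filter (fun x => decide (p x)) := by
  induction track generalizing g with
  | nil => simp
  | cons x xs ih =>
      simp only [List.foldl, List.filter]
      by_cases h : p x <;> simp [h, ih]

theorem pvAltLoop_eq (head : Int) (track g l : List Int) :
    pvAltLoop head track g l
      = (g ++ track.filter (fun x => head < x), l ++ track.filter (fun x => x < head)) := by
  induction track generalizing g l with
  | nil => simp [pvAltLoop]
  | cons x xs ih =>
      simp only [pvAltLoop, List.filter]
      rcases lt_trichotomy x head with h | h | h
      · have h1 : ¬ x > head := by omega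
        simp [h, h1, ih, not_lt_of_gt h]
      · subst h
        simp [ih, lt_irrefl]
      · simp [h, ih, not_lt_of_gt h]

-- ===== VERDICT (by name: the statement is the Claim_ definition above) =====
theorem sortTrackForCSCAN_spec : Claim_equal_sortTrackForCSCAN := by
  intro track head _
  unfold Spec_sortTrackForCSCAN sortTrackForCSCAN sortTrackForCSCAN_alt
  rw [pvAltLoop_eq]
  simp only [pv_foldl_filter (fun x => head < x), pv_foldl_filter (fun x => head > x)]
  simp [gt_iff_lt]
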